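-- pv_equiv track=rewrite | github.com/KyleJGreen/Gematria | IOFunctions.py | getLines
-- ===== SOURCE A (Python) =====
-- def getLines(text):
--     line = ""
--     lines = []
--
--     # iterate through text in reverse order, parsing on digits and adding to list of lines
--     for char in reversed(text):
--         # omit newline characters
--         if char == '\n' or char == 'v':
--             continue
--         # parse on digits
--         if char.isdigit():
--             if line is not "":
--                 lines.insert(0, line.replace('Leiticus', 'Leviticus'))  # insert line to beginning of list
--                 line = ""  # reset line
--         else:
--             line = char + line
--
--     return lines  # return the lines
-- ===== SOURCE B (Python) =====
-- def getLines(text):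
--     # Single forward pass with a list buffer: O(n) instead of A's reversed
--     # iteration with string prepends and insert(0, ...).
--     out = []
--     buf = []
--     seen = False  # a digit has been seen (segments before the first digit are dropped)
--     for char in text:
--         if char == '\n' or char == 'v':
--             continue
--         if char.isdigit():
--             if seen and buf:
--                 out.append(''.join(buf).replace('Leiticus', 'Leviticus'))
--             seen = True
--             buf = []
--         else:
--             buf.append(char)
--     if seen and buf:
--         out.append(''.join(buf).replace('Leiticus', 'Leviticus'))
--     return out
-- ===== Notes on version B (the rewrite author's own statement) =====
-- stated objective: faster
-- what changed: Replaces A's reversed-order scan with quadratic string prepends (char + line) and lines.insert(0, ...) by a single forward pass that accumulates characters in a list buffer, joins on each flush, and tracks a boolean flag so the segment before the first digit is dropped.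
import Mathlib
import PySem

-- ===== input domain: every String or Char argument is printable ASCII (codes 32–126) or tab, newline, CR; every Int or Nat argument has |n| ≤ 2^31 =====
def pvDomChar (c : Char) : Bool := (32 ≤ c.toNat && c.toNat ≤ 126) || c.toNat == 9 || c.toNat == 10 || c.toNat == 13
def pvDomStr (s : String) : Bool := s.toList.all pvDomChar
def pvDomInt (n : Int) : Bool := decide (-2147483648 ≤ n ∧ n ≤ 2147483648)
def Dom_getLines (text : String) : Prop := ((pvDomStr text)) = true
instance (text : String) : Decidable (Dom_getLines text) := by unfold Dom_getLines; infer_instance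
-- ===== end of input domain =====

-- B is a single forward pass with a list buffer instead of A's reversed scan with
-- string prepends and insert(0, ...); same return value, O(n) instead of O(n^2).

-- ===== PORT A =====
-- state = (line, lines); one step of A's loop body ('line is not ""' behaves as '!=' since "" is interned)
def getLinesStepA (st : List Char × List String) (c : Char) : List Char × List String :=
  if c = '\n' ∨ c = 'v' then st
  else if PySem.Chars.isdigit c then
    if st.1 ≠ [] then
      ([], PySem.List.insert st.2 0
             (String.ofList (PySem.Chars.replace st.1 "Leiticus".toList "Leviticus".toList)))
    else st
  else (c :: st.1, st.2)

def getLines (text : String) : List String :=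
  (text.toList.reverse.foldl getLinesStepA ([], [])).2

-- ===== PORT B =====
-- state = (buf, seen, out); one step of B's loop body
def getLinesStepB (st : List Char × Bool × List String) (c : Char) : List Char × Bool × List String :=
  if c = '\n' ∨ c = 'v' then st
  else if PySem.Chars.isdigit c then
    ([], true,
      st.2.2 ++ (if st.2.1 = true ∧ st.1 ≠ [] then
        [String.ofList (PySem.Chars.replace st.1 "Leiticus".toList "Leviticus".toList)] else []))
  else (st.1 ++ [c], st.2.1, st.2.2)

def getLines_alt (text : String) : List String :=
  let st := text.toList.foldl getLinesStepB ([], false, [])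
  st.2.2 ++ (if st.2.1 = true ∧ st.1 ≠ [] then
    [String.ofList (PySem.Chars.replace st.1 "Leiticus".toList "Leviticus".toList)] else [])

-- ===== PRECONDITION & SPEC =====
def Spec_getLines (text : String) (out : List String) : Prop := out = getLines_alt text
instance (text : String) (out : List String) : Decidable (Spec_getLines text out) := by unfold Spec_getLines; infer_instance

-- ===== CLAIM (what is proved, stated in full; the proofs are below) =====
def Claim_equal_getLines : Prop := ∀ (text : String), Dom_getLines text → Spec_getLines text (getLines text)

-- ===== LEMMAS AND PROOFS =====

-- A's fold over the reversed list, written forwards via foldr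
def getLinesA (cs : List Char) : List Char × List String :=
  cs.foldr (fun c st => getLinesStepA st c) ([], [])

-- the line A flushes from 'line' cs
def pvRepl (cs : List Char) : String :=
  String.ofList (PySem.Chars.replace cs "Leiticus".toList "Leviticus".toList)

-- B's finalizer
def pvFin (st : List Char × Bool × List String) : List String :=
  st.2.2 ++ (if st.2.1 = true ∧ st.1 ≠ [] then [pvRepl st.1] else [])

theorem pvFin_seen_true (cs : List Char) :
    ∀ (buf : List Char) (out : List String),
      pvFin (cs.foldl getLinesStepB (buf, true, out)) =
        out ++ (if buf ++ (getLinesA cs).1 = [] then [] else [pvRepl (buf ++ (getLinesA cs).1)])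
            ++ (getLinesA cs).2 := by
  induction cs with
  | nil =>
    intro buf out
    by_cases h : buf = [] <;> simp [getLinesA, pvFin, pvRepl, h]
  | cons c cs ih =>
    intro buf out
    by_cases hs : c = '\n' ∨ c = 'v'
    · have hA : getLinesA (c :: cs) = getLinesA cs := by
        simp [getLinesA, getLinesStepA, if_pos hs]
      simp only [List.foldl_cons, getLinesStepB, if_pos hs, hA]
      exact ih buf out
    · by_cases hd : PySem.Chars.isdigit c = true
      · simp only [List.foldl_cons, getLinesStepB, if_neg hs, if_pos hd]
        rw [ih]
        have hA : getLinesA (c :: cs) =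
            if (getLinesA cs).1 ≠ [] then
              ([], PySem.List.insert (getLinesA cs).2 0 (pvRepl (getLinesA cs).1))
            else getLinesA cs := by
          simp [getLinesA, getLinesStepA, if_neg hs, if_pos hd, pvRepl]
        by_cases hb : buf = [] <;> by_cases hl : (getLinesA cs).1 = [] <;>
          simp [hA, hb, hl, PySem.List.insert_zero, pvRepl]
      · simp only [List.foldl_cons, getLinesStepB, if_neg hs, if_neg hd]
        rw [ih]
        have hA : getLinesA (c :: cs) = (c :: (getLinesA cs).1, (getLinesA cs).2) := by
          simp [getLinesA, getLinesStepA, if_neg hs, if_neg hd]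
        rw [hA]
        rw [show buf ++ c :: (getLinesA cs).1 = (buf ++ [c]) ++ (getLinesA cs).1 by simp]

theorem pvFin_seen_false (cs : List Char) :
    ∀ (buf : List Char) (out : List String),
      pvFin (cs.foldl getLinesStepB (buf, false, out)) = out ++ (getLinesA cs).2 := by
  induction cs with
  | nil => intro buf out; simp [pvFin, getLinesA]
  | cons c cs ih =>
    intro buf out
    by_cases hs : c = '\n' ∨ c = 'v'
    · simp only [List.foldl_cons, getLinesStepB, if_pos hs]
      rw [ih]
      simp [getLinesA, getLinesStepA, if_pos hs]
    · by_cases hd : PySem.Chars.isdigit c = true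
      · simp only [List.foldl_cons, getLinesStepB, if_neg hs, if_pos hd]
        simp only [show ((false = true ∧ buf ≠ [])) = False by simp, if_false, List.append_nil]
        rw [pvFin_seen_true]
        have hA : getLinesA (c :: cs) =
            if (getLinesA cs).1 ≠ [] then
              ([], PySem.List.insert (getLinesA cs).2 0 (pvRepl (getLinesA cs).1))
            else getLinesA cs := by
          simp [getLinesA, getLinesStepA, if_neg hs, if_pos hd, pvRepl]
        by_cases hl : (getLinesA cs).1 = [] <;>
          simp [hA, hl, PySem.List.insert_zero]
      · simp only [List.foldl_cons, getLinesStepB, if_neg hs, if_neg hd]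
        rw [ih]
        simp [getLinesA, getLinesStepA, if_neg hs, if_neg hd]

-- ===== VERDICT (by name: the statement is the Claim_ definition above) =====
theorem getLines_spec : Claim_equal_getLines := by
  intro text _
  unfold Spec_getLines getLines getLines_alt
  rw [List.foldl_reverse]
  have h := pvFin_seen_false text.toList [] []
  simp only [pvFin, pvRepl, List.nil_append] at h
  rw [h]
  rfl
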